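-- pv_equiv track=rewrite | github.com/hadala-p/Bulls_and_Cows | src/Validator.py | word_check
-- ===== SOURCE A (Python) =====
-- def word_check(word, word_len):
--     if not word.isalpha():
--         return False
--     if len(word) > word_len:
--         return False
--     if len(word) < word_len:
--         return False
--     else:
--         list = []
--         temp = word.lower()
--         for i in temp:
--             if i in list:
--                 return False
--             list.append(i)
--     return True
-- ===== SOURCE B (Python) =====
-- def word_check(word, word_len):
--     if not word.isalpha() or len(word) != word_len:
--         return False
--     s = sorted(word.lower())
--     return all(a != b for a, b in zip(s, s[1:]))
-- ===== Notes on version B (the rewrite author's own statement) =====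
-- stated objective: alternative
-- what changed: Uniqueness is decided by a different algorithm: instead of scanning each letter against a growing seen-list with an early return, B sorts the lowercased letters and checks that no two adjacent letters of the sorted list are equal.
import Mathlib
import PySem

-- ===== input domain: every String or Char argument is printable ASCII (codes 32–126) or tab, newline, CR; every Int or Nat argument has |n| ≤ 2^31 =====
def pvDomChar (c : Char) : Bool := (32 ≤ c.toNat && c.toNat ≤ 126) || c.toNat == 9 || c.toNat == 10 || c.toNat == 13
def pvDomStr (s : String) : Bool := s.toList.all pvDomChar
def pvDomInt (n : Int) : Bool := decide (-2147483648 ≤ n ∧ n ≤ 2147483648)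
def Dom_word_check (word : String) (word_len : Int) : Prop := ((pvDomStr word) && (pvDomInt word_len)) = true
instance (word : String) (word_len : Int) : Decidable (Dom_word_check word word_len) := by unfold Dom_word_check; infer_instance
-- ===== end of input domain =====

-- B decides letter-uniqueness by a different algorithm: sort the lowercased letters
-- and check that no two adjacent letters of the sorted list are equal (objective: alternative).

-- ===== PORT A =====
-- the 'for i in temp' loop with the growing 'list' accumulator and early return False
def wcLoop : List Char → List Char → Bool
  | [], _ => true
  | c :: rest, acc => if acc.contains c then false else wcLoop rest (acc ++ [c])

def word_check (word : String) (word_len : Int) : Bool :=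
  if !(PySem.Str.strIsalpha word) then false
  else if ((PySem.Str.len word : Int) > word_len) then false
  else if ((PySem.Str.len word : Int) < word_len) then false
  else wcLoop (PySem.Str.lower word).toList []

-- ===== PORT B =====
-- all(a != b for a, b in zip(s, s[1:])) : adjacent-pair scan of the sorted list
def pairsDistinct : List Char → Bool
  | a :: b :: rest => (a != b) && pairsDistinct (b :: rest)
  | _ => true

def word_check_alt (word : String) (word_len : Int) : Bool :=
  if !(PySem.Str.strIsalpha word) || !((PySem.Str.len word : Int) == word_len) then false
  else
    let s := PySem.List.sorted (PySem.Str.lower word).toList (fun c => c) false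
    pairsDistinct s

-- ===== PRECONDITION & SPEC =====
def Spec_word_check (word : String) (word_len : Int) (out : Bool) : Prop := out = word_check_alt word word_len
instance (word : String) (word_len : Int) (out : Bool) : Decidable (Spec_word_check word word_len out) := by unfold Spec_word_check; infer_instance

-- ===== CLAIM =====
def Claim_equal_word_check : Prop := ∀ (word : String) (word_len : Int), Dom_word_check word word_len → Spec_word_check word word_len (word_check word word_len)

-- ===== LEMMAS AND PROOFS =====

theorem wcLoop_eq_true_iff (t : List Char) : ∀ acc : List Char,
    wcLoop t acc = true ↔ t.Nodup ∧ ∀ x ∈ t, x ∉ acc := by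
  induction t with
  | nil => intro acc; simp [wcLoop]
  | cons c rest ih =>
    intro acc
    by_cases h : c ∈ acc
    · simp [wcLoop, h]
    · simp only [wcLoop, List.contains_eq_mem, h, decide_false, Bool.false_eq_true,
        if_false, ih, List.nodup_cons, List.mem_cons]
      constructor
      · rintro ⟨hn, hall⟩
        refine ⟨⟨fun hc => ?_, hn⟩, ?_⟩
        · exact (hall c hc) (by simp)
        · rintro x (rfl | hx)
          · exact h
          · intro hxacc; exact hall x hx (by simp [hxacc])
      · rintro ⟨⟨hcr, hn⟩, hall⟩
        refine ⟨hn, fun x hx hxm => ?_⟩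
        rcases List.mem_append.mp hxm with hxa | hxc
        · exact hall x (Or.inr hx) hxa
        · simp at hxc; subst hxc; exact hcr hx

-- on a ≤-sorted list, "no equal adjacent pair" is exactly Nodup
theorem pairsDistinct_iff_nodup (l : List Char)
    (hs : l.Pairwise (fun a b => a ≤ b)) : pairsDistinct l = true ↔ l.Nodup := by
  induction l with
  | nil => simp [pairsDistinct]
  | cons a t ih =>
    cases t with
    | nil => simp [pairsDistinct]
    | cons b rest =>
      have hs' : (b :: rest).Pairwise (fun a b => a ≤ b) := hs.tail
      have hab : a ≤ b := (List.pairwise_cons.mp hs).1 b (by simp)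
      have hble : ∀ x ∈ rest, b ≤ x := (List.pairwise_cons.mp hs').1
      simp only [pairsDistinct, Bool.and_eq_true, bne_iff_ne, ne_eq, ih hs',
        List.nodup_cons, List.mem_cons]
      constructor
      · rintro ⟨hne, hn⟩
        refine ⟨?_, hn⟩
        rintro (rfl | hx)
        · exact hne rfl
        · have : b ≤ a := hble a hx
          exact hne (le_antisymm hab this)
      · rintro ⟨hna, hn⟩
        exact ⟨fun h => hna (Or.inl h), hn⟩

theorem wcLoop_eq_pairsDistinct (t : List Char) :
    wcLoop t [] = pairsDistinct (PySem.List.sorted t (fun c => c) false) := by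
  have hperm := PySem.List.sorted_perm (xs := t) (key := fun c : Char => c) (rev := false)
  have hpw := PySem.List.sorted_pairwise (xs := t) (key := fun c : Char => c)
  have h1 : wcLoop t [] = true ↔ t.Nodup := by
    rw [wcLoop_eq_true_iff]; simp
  have h2 : pairsDistinct (PySem.List.sorted t (fun c => c) false) = true ↔ t.Nodup := by
    rw [pairsDistinct_iff_nodup _ hpw, hperm.nodup_iff]
  by_cases hn : t.Nodup
  · rw [h1.mpr hn, (h2.mpr hn).symm]
  · have ha : wcLoop t [] = false := by
      rcases hb : wcLoop t [] with _ | _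
      · rfl
      · exact absurd (h1.mp hb) hn
    have hbf : pairsDistinct (PySem.List.sorted t (fun c => c) false) = false := by
      rcases hb : pairsDistinct (PySem.List.sorted t (fun c => c) false) with _ | _
      · rfl
      · exact absurd (h2.mp hb) hn
    rw [ha, hbf]

-- ===== VERDICT =====
theorem word_check_spec : Claim_equal_word_check := by
  intro word word_len _
  unfold Spec_word_check word_check word_check_alt
  simp only [PySem.Str.len_eq, PySem.Str.strIsalpha_eq]
  by_cases ha : PySem.Chars.strIsalpha word.toList = true
  · rcases lt_trichotomy ((word.length : Int)) word_len with h | h | h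
    · have h2 : (((word.length : Int)) == word_len) = false := by simp; omega
      simp [ha, h, h2]
    · have h1 : ¬ ((word.length : Int) > word_len) := by omega
      have h2 : ¬ ((word.length : Int) < word_len) := by omega
      have h3 : (((word.length : Int)) == word_len) = true := by simp; omega
      simp [ha, h1, h2, h3, wcLoop_eq_pairsDistinct]
    · have h1 : ((word.length : Int) > word_len) := by omega
      have h2 : (((word.length : Int)) == word_len) = false := by simp; omega
      simp [ha, h1, h2]
  · simp [Bool.not_eq_true] at ha
    simp [ha]
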